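-- pv_equiv track=rewrite | github.com/fact-project/rain_and_wind_auto_park | autopark_quantiles.py | intervals
-- ===== SOURCE A (Python) =====
-- def intervals(data_column):
--     ''' Determine the length of intervals between decisions
--     '''
--     list_of_intervals = []
--     true = 0
--     false = 0
--     for unit in data_column:
--         if unit == False:
--             false += 1
--             if true != 0:
--                 list_of_intervals.append(true)
--             true = 0
--         else:
--             true += 1
--             if false != 0:
--                 list_of_intervals.append(false)
--             false = 0
--     return list_of_intervals
-- ===== SOURCE B (Python) =====
-- def intervals(data_column):
--     # Two-stage index-based approach: find the positions where the boolean
--     # value changes (run boundaries), then the interval lengths are the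
--     # pairwise differences of consecutive boundaries; the final run (from the
--     # last boundary to the end) is never emitted.
--     n = len(data_column)
--     cuts = [i for i in range(1, n) if data_column[i] != data_column[i - 1]]
--     bounds = [0] + cuts
--     return [b - a for a, b in zip(bounds, cuts)]
-- ===== Notes on version B (the rewrite author's own statement) =====
-- stated objective: alternative
-- what changed: Replaces A's stateful two-counter transition loop with a staged index computation: collect the boundary indices where the value changes, then return the pairwise differences of consecutive boundaries (the unterminated final run is never produced).
import Mathlib
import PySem

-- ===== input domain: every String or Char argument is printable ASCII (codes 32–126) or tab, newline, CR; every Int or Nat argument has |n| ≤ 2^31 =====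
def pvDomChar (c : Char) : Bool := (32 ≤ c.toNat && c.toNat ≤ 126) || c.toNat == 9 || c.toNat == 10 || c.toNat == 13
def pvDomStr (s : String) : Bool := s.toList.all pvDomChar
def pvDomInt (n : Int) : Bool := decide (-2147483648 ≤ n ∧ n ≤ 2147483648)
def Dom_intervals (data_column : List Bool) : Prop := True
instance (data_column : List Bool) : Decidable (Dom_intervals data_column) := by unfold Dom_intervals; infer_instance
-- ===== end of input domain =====

-- B replaces A's two-counter transition loop with a staged index computation (boundary indices, then pairwise differences); same O(n) cost, different decomposition.


-- ===== PORT A =====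
-- one loop step of A: (list_of_intervals, true-counter, false-counter)
def aStep (st : List Int × Int × Int) (unit : Bool) : List Int × Int × Int :=
  if unit == false then
    let f := st.2.2 + 1
    let acc := if st.2.1 ≠ 0 then st.1 ++ [st.2.1] else st.1
    (acc, 0, f)
  else
    let t := st.2.1 + 1
    let acc := if st.2.2 ≠ 0 then st.1 ++ [st.2.2] else st.1
    (acc, t, 0)

def intervals (data_column : List Bool) : List Int :=
  (data_column.foldl aStep ([], 0, 0)).1

-- ===== PORT B =====
-- indices i in range(1, n) always satisfy 0 ≤ i-1 < i < n, so pyGetD is exact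
-- for Python's data_column[i] / data_column[i-1] here
def intervals_alt (data_column : List Bool) : List Int :=
  let n : Int := data_column.length
  let cuts := (PySem.List.pyRange 1 n 1).filter
      (fun i => !(PySem.List.pyGetD data_column i false == PySem.List.pyGetD data_column (i - 1) false))
  let bounds := (0 : Int) :: cuts
  (bounds.zip cuts).map (fun p => p.2 - p.1)

-- ===== PRECONDITION & SPEC =====
def Spec_intervals (data_column : List Bool) (out : List Int) : Prop := out = intervals_alt data_column
instance (data_column : List Bool) (out : List Int) : Decidable (Spec_intervals data_column out) := by unfold Spec_intervals; infer_instance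

-- ===== CLAIM =====
def Claim_equal_intervals : Prop := ∀ (data_column : List Bool), Dom_intervals data_column → Spec_intervals data_column (intervals data_column)

-- ===== LEMMAS AND PROOFS =====
-- proof-only abstraction: run lengths of consecutive equal elements, starting inside a run
-- of value `cur` with `n` elements already counted
def goRuns (cur : Bool) (n : Int) : List Bool → List Int
  | [] => [n]
  | y :: ys => if y == cur then goRuns cur (n + 1) ys else n :: goRuns y 1 ys

theorem goRuns_ne_nil (cur : Bool) (n : Int) (xs : List Bool) : goRuns cur n xs ≠ [] := by
  cases xs with
  | nil => simp [goRuns]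
  | cons y ys => simp only [goRuns]; split <;> simp [goRuns_ne_nil]

theorem foldA_eq (xs : List Bool) : ∀ (acc : List Int) (c : Bool) (n : Int), 0 < n →
    (List.foldl aStep (acc, (if c then n else 0), (if c then 0 else n)) xs).1
      = acc ++ (goRuns c n xs).dropLast := by
  induction xs with
  | nil => intro acc c n hn; simp [goRuns]
  | cons x xs ih =>
    intro acc c n hn
    have hne : n ≠ 0 := by omega
    cases x <;> cases c
    · simpa [List.foldl_cons, aStep, goRuns] using ih acc false (n + 1) (by omega)
    · have := ih (acc ++ [n]) false 1 Int.one_pos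
      simpa [List.foldl_cons, aStep, goRuns, hne,
        List.dropLast_cons_of_ne_nil (goRuns_ne_nil false 1 xs), List.append_assoc] using this
    · have := ih (acc ++ [n]) true 1 Int.one_pos
      simpa [List.foldl_cons, aStep, goRuns, hne,
        List.dropLast_cons_of_ne_nil (goRuns_ne_nil true 1 xs), List.append_assoc] using this
    · simpa [List.foldl_cons, aStep, goRuns] using ih acc true (n + 1) (by omega)

-- proof-only abstraction for B: the change indices, starting at index i with previous value p
def cutsFrom (p : Bool) (i : Int) : List Bool → List Int
  | [] => []
  | y :: ys => if y == p then cutsFrom y (i + 1) ys else i :: cutsFrom y (i + 1) ys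

-- B's filtered range IS cutsFrom: for dc = pre ++ p :: xs, the filter over [pre.length+1, |dc|)
theorem filter_eq_cutsFrom (xs : List Bool) : ∀ (pre : List Bool) (p : Bool),
    (PySem.List.pyRange ((pre.length : Int) + 1) ((pre ++ p :: xs).length : Int) 1).filter
      (fun i => !(PySem.List.pyGetD (pre ++ p :: xs) i false
                  == PySem.List.pyGetD (pre ++ p :: xs) (i - 1) false))
      = cutsFrom p ((pre.length : Int) + 1) xs := by
  induction xs with
  | nil =>
    intro pre p
    rw [PySem.List.pyRange_one_eq_nil (by simp)]
    rfl
  | cons y ys ih =>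
    intro pre p
    have hcons : PySem.List.pyRange ((pre.length : Int) + 1) ((pre ++ p :: y :: ys).length : Int) 1
        = ((pre.length : Int) + 1) :: PySem.List.pyRange ((pre.length : Int) + 1 + 1) ((pre ++ p :: y :: ys).length : Int) 1 :=
      PySem.List.pyRange_one_cons (by simp)
    have hget1 : PySem.List.pyGetD (pre ++ p :: y :: ys) ((pre.length : Int) + 1) false = y := by
      have : ((pre.length : Int) + 1) = (((pre ++ [p]).length : Nat) : Int) := by simp
      rw [this, PySem.List.pyGetD_natCast]
      have : pre ++ p :: y :: ys = (pre ++ [p]) ++ y :: ys := by simp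
      rw [this]
      simp
    have hget0 : PySem.List.pyGetD (pre ++ p :: y :: ys) ((pre.length : Int) + 1 - 1) false = p := by
      have h1 : ((pre.length : Int) + 1 - 1) = ((pre.length : Nat) : Int) := by omega
      rw [h1, PySem.List.pyGetD_natCast]
      simp
    have hrec := ih (pre ++ [p]) y
    have hL : ((pre ++ [p]).length : Int) + 1 = (pre.length : Int) + 1 + 1 := by simp
    have hLst : ((pre ++ [p]) ++ y :: ys) = pre ++ p :: y :: ys := by simp
    rw [hL, hLst] at hrec
    rw [hcons, List.filter_cons, hrec]
    simp only [hget1, hget0, cutsFrom]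
    cases y <;> cases p <;> simp

-- pairwise differences of (base :: cuts) zip cuts = dropLast of the run lengths,
-- provided base = i - n (the start index of the current run)
theorem diffs_eq_dropLast (xs : List Bool) : ∀ (c : Bool) (i n : Int),
    (((i - n) :: cutsFrom c i xs).zip (cutsFrom c i xs)).map (fun p => p.2 - p.1)
      = (goRuns c n xs).dropLast := by
  induction xs with
  | nil => intro c i n; simp [cutsFrom, goRuns]
  | cons y ys ih =>
    intro c i n
    by_cases hy : y = c
    · subst hy
      have h : i - n = (i + 1) - (n + 1) := by omega
      simp only [cutsFrom, goRuns, beq_self_eq_true, if_true, h]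
      exact ih y (i + 1) (n + 1)
    · have hb : (y == c) = false := by cases y <;> cases c <;> simp_all
      simp only [cutsFrom, goRuns, hb, Bool.false_eq_true, if_false, List.zip_cons_cons,
        List.map_cons, List.dropLast_cons_of_ne_nil (goRuns_ne_nil y 1 ys)]
      rw [show i - (i - n) = n by omega]
      congr 1
      have := ih y (i + 1) 1
      rw [show i + 1 - 1 = i by omega] at this
      exact this

-- ===== VERDICT =====
theorem intervals_spec : Claim_equal_intervals := by
  intro l _
  unfold Spec_intervals intervals intervals_alt
  cases l with
  | nil => rfl
  | cons x xs =>
    have hA : (List.foldl aStep ([], 0, 0) (x :: xs)).1 = (goRuns x 1 xs).dropLast := by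
      have h1 : aStep ([], 0, 0) x = ([], (if x then 1 else 0), (if x then 0 else 1)) := by
        cases x <;> simp [aStep]
      rw [List.foldl_cons, h1]
      simpa using foldA_eq xs [] x 1 (by omega)
    have hcuts := filter_eq_cutsFrom xs [] x
    simp only [List.length_nil, Nat.cast_zero, zero_add, List.nil_append] at hcuts
    simp only [hcuts, hA]
    have := diffs_eq_dropLast xs x 1 1
    simpa using this.symm
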